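-- pv_equiv track=rewrite | github.com/egerdem/orientation-calibration | multi_r18_rot_real.py | mzeros_index
-- ===== SOURCE A (Python) =====
-- def mzeros_index(order):
--     index = 0
--     ind = []
--     for n in range(order + 1):
--         for m in range(-n, n + 1):
--             if m == 0:
--                 ind.append(index)
--             index += 1
--     return (ind)
-- ===== SOURCE B (Python) =====
-- def mzeros_index(order):
--     # m == 0 occurs once per n, at flat index n^2 + n = n*(n+1)
--     return [n * (n + 1) for n in range(order + 1)]
-- ===== Notes on version B (the rewrite author's own statement) =====
-- stated objective: faster
-- what changed: Replaces the nested loop that counts every (n,m) pair with the closed-form flat index n*(n+1) for each n.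
import Mathlib
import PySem

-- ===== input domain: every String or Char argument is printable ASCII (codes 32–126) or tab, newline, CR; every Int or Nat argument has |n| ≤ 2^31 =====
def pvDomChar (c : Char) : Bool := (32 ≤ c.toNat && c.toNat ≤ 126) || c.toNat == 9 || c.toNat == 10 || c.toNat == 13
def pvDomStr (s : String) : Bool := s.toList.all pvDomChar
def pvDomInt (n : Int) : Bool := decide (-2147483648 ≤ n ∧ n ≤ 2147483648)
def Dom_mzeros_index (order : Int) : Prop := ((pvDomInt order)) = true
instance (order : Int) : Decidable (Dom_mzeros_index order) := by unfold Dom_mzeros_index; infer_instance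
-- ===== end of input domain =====

-- B replaces A's nested counting loop with the closed-form flat index n*(n+1) per n (asymptotically faster).

-- ===== PORT A =====
def mzeros_index (order : Int) : List Int :=
  ((PySem.List.pyRange 0 (order + 1) 1).foldl
    (fun (st : Int × List Int) n =>
      (PySem.List.pyRange (-n) (n + 1) 1).foldl
        (fun st m => (st.1 + 1, if m = 0 then st.2 ++ [st.1] else st.2)) st)
    (0, [])).2

-- ===== PORT B =====
def mzeros_index_alt (order : Int) : List Int :=
  (PySem.List.pyRange 0 (order + 1) 1).map (fun n => n * (n + 1))

-- ===== PRECONDITION & SPEC =====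
def Spec_mzeros_index (order : Int) (out : List Int) : Prop := out = mzeros_index_alt order
instance (order : Int) (out : List Int) : Decidable (Spec_mzeros_index order out) := by unfold Spec_mzeros_index; infer_instance

-- ===== CLAIM (what is proved, stated in full; the proofs are below) =====
def Claim_equal_mzeros_index : Prop := ∀ (order : Int), Dom_mzeros_index order → Spec_mzeros_index order (mzeros_index order)

-- ===== LEMMAS AND PROOFS =====

-- A's inner step over a run of nonzero m's only increments the counter.
theorem inner_skip (l : List Int) (h : ∀ m ∈ l, m ≠ 0) (i : Int) (acc : List Int) :
    l.foldl (fun (st : Int × List Int) m => (st.1 + 1, if m = 0 then st.2 ++ [st.1] else st.2)) (i, acc)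
      = (i + l.length, acc) := by
  induction l generalizing i with
  | nil => simp
  | cons x xs ih =>
    have hx : x ≠ 0 := h x (by simp)
    simp only [List.foldl_cons, if_neg hx]
    rw [ih (fun m hm => h m (by simp [hm]))]
    simp; ring_nf

-- A's inner loop for block n, starting at counter i, appends exactly i + n and advances by 2n+1.
theorem inner_block (n : Int) (hn : 0 ≤ n) (i : Int) (acc : List Int) :
    (PySem.List.pyRange (-n) (n + 1) 1).foldl
      (fun (st : Int × List Int) m => (st.1 + 1, if m = 0 then st.2 ++ [st.1] else st.2)) (i, acc)
      = (i + 2 * n + 1, acc ++ [i + n]) := by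
  have h1 : PySem.List.pyRange (-n) (n + 1) 1
      = PySem.List.pyRange (-n) 0 1 ++ PySem.List.pyRange 0 (n + 1) 1 :=
    PySem.List.pyRange_one_append _ _ _ (by omega) (by omega)
  have h2 : PySem.List.pyRange 0 (n + 1) 1 = 0 :: PySem.List.pyRange 1 (n + 1) 1 :=
    PySem.List.pyRange_one_cons (by omega)
  have h0 : ∀ m ∈ PySem.List.pyRange (-n) 0 1, m ≠ 0 := fun m hm => by
    have := (PySem.List.mem_pyRange_one).1 hm; omega
  have h3 : ∀ m ∈ PySem.List.pyRange 1 (n + 1) 1, m ≠ 0 := fun m hm => by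
    have := (PySem.List.mem_pyRange_one).1 hm; omega
  rw [h1, h2, List.foldl_append, inner_skip (PySem.List.pyRange (-n) 0 1) h0,
      List.foldl_cons]
  rw [inner_skip (PySem.List.pyRange 1 (n + 1) 1) h3, PySem.List.length_pyRange_one,
      PySem.List.length_pyRange_one]
  have e1 : ((0 - -n).toNat : Int) = n := by omega
  have e2 : ((n + 1 - 1).toNat : Int) = n := by omega
  rw [e1, e2, Prod.mk.injEq]
  exact ⟨by ring, rfl⟩

-- A's outer loop up to a natural bound b: counter reaches b*b and the list is B's.
theorem outer_loop (b : Nat) :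
    (PySem.List.pyRange 0 (b : Int) 1).foldl
      (fun (st : Int × List Int) n =>
        (PySem.List.pyRange (-n) (n + 1) 1).foldl
          (fun st m => (st.1 + 1, if m = 0 then st.2 ++ [st.1] else st.2)) st)
      (0, [])
      = ((b : Int) * b, (PySem.List.pyRange 0 (b : Int) 1).map (fun n => n * (n + 1))) := by
  induction b with
  | zero => simp [PySem.List.pyRange_one_eq_nil]
  | succ k ih =>
    have hsplit : PySem.List.pyRange 0 ((k : Int) + 1) 1
        = PySem.List.pyRange 0 (k : Int) 1 ++ [(k : Int)] :=
      PySem.List.pyRange_one_succ_right (by positivity)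
    push_cast
    rw [hsplit, List.foldl_append, List.map_append, ih]
    simp only [List.foldl_cons, List.foldl_nil, List.map_cons, List.map_nil]
    rw [inner_block (k : Int) (by positivity), Prod.mk.injEq]
    exact ⟨by ring, by simp; ring⟩

-- ===== VERDICT (by name: the statement is the Claim_ definition above) =====
theorem mzeros_index_spec : Claim_equal_mzeros_index := by
  intro order _
  unfold Spec_mzeros_index mzeros_index mzeros_index_alt
  by_cases h : order + 1 ≤ 0
  · rw [PySem.List.pyRange_one_eq_nil h]; rfl
  · have hb : order + 1 = (((order + 1).toNat : Nat) : Int) := by omega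
    rw [hb, outer_loop]
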